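-- pv_equiv track=rewrite | github.com/GerardoCasten3/MSA | Proyecto Final/metodos_algoritmo.py | seleccionar_partes_comunes
-- ===== SOURCE A (Python) =====
-- def seleccionar_partes_comunes(matriz1, matriz2):
--     partes_comunes = []
--     for palabra_padre1, palabra_padre2 in zip(matriz1, matriz2):
--         partes = []
--         for letra_padre1, letra_padre2 in zip(palabra_padre1, palabra_padre2):
--             if letra_padre1 == letra_padre2:
--                 partes.append(letra_padre1)
--             else:
--                 partes.append('-')  # Marcar las diferencias con un guion
--         partes_comunes.append(''.join(partes))
--
--     # Mantener el orden de las letras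
--     for i in range(len(partes_comunes)):
--         palabra_padre1, palabra_padre2 = matriz1[i], matriz2[i]
--         palabra_comun = partes_comunes[i]
--         nueva_palabra_comun = ''
--         for letra_padre1, letra_padre2, letra_comun in zip(palabra_padre1, palabra_padre2, palabra_comun):
--             if letra_comun != '-':
--                 nueva_palabra_comun += letra_comun
--             elif letra_padre1 != '-':
--                 nueva_palabra_comun += letra_padre1
--             else:
--                 nueva_palabra_comun += letra_padre2
--         partes_comunes[i] = nueva_palabra_comun
--
--     return tuple(partes_comunes)
-- ===== SOURCE B (Python) =====
-- def seleccionar_partes_comunes(matriz1, matriz2):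
--     return tuple(
--         ''.join(l1 if l1 != '-' else l2 for l1, l2 in zip(w1, w2))
--         for w1, w2 in zip(matriz1, matriz2)
--     )
-- ===== Notes on version B (the rewrite author's own statement) =====
-- stated objective: simpler
-- what changed: Replaces A's two passes (a '-'-sentinel common-letter table followed by an index loop that re-merges it with both parents) by one direct pass over zip(matriz1, matriz2) emitting l1 if l1 != '-' else l2 per character pair.
import Mathlib
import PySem

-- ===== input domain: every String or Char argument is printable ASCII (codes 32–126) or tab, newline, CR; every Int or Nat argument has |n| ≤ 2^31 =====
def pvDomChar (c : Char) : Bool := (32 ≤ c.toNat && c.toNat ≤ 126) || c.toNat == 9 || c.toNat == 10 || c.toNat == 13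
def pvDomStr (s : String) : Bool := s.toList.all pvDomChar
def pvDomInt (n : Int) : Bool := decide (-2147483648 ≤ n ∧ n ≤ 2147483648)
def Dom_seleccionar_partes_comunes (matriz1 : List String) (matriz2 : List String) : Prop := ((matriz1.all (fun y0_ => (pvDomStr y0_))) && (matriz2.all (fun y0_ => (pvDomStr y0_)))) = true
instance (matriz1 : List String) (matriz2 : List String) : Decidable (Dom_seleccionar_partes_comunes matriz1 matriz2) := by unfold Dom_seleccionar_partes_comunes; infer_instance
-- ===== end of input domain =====

-- B replaces A's two passes (sentinel '-' table + re-merge loop) with one direct pass; same cost, simpler.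

-- ===== PORT A =====
-- first pass: common letters, differences marked '-'
def pvTabla (w1 w2 : List Char) : List Char :=
  (w1.zip w2).map (fun lp => if lp.1 = lp.2 then lp.1 else '-')

-- inner loop of the second pass: zip of the two parent words and the common word,
-- building nueva_palabra_comun character by character
def pvMerge : List Char → List Char → List Char → List Char
  | a :: as, b :: bs, c :: cs =>
      (if c ≠ '-' then c else if a ≠ '-' then a else b) :: pvMerge as bs cs
  | _, _, _ => []

def seleccionar_partes_comunes (matriz1 : List String) (matriz2 : List String) : List String :=
  let partes_comunes : List String :=
    (matriz1.zip matriz2).map (fun p => String.ofList (pvTabla p.1.toList p.2.toList))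
  -- second pass: for i in range(len(partes_comunes)); each i is in range of all three
  -- lists (partes_comunes is the zip), so the defaulted reads are exact
  (List.range partes_comunes.length).map (fun i =>
    String.ofList (pvMerge ((matriz1.getD i "").toList) ((matriz2.getD i "").toList)
      ((partes_comunes.getD i "").toList)))

-- ===== PORT B =====
def seleccionar_partes_comunes_alt (matriz1 : List String) (matriz2 : List String) : List String :=
  (matriz1.zip matriz2).map (fun p =>
    String.ofList ((p.1.toList.zip p.2.toList).map (fun lp => if lp.1 ≠ '-' then lp.1 else lp.2)))

-- ===== PRECONDITION & SPEC =====
def Spec_seleccionar_partes_comunes (matriz1 : List String) (matriz2 : List String) (out : List String) : Prop := out = seleccionar_partes_comunes_alt matriz1 matriz2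
instance (matriz1 : List String) (matriz2 : List String) (out : List String) : Decidable (Spec_seleccionar_partes_comunes matriz1 matriz2 out) := by unfold Spec_seleccionar_partes_comunes; infer_instance

-- ===== CLAIM (what is proved, stated in full; the proofs are below) =====
def Claim_equal_seleccionar_partes_comunes : Prop := ∀ (matriz1 : List String) (matriz2 : List String), Dom_seleccionar_partes_comunes matriz1 matriz2 → Spec_seleccionar_partes_comunes matriz1 matriz2 (seleccionar_partes_comunes matriz1 matriz2)

-- ===== LEMMAS AND PROOFS =====

-- per-word: A's merge of the two parents with the sentinel table equals B's one-pass rule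
theorem pvMerge_tabla (a b : List Char) :
    pvMerge a b (pvTabla a b) = (a.zip b).map (fun lp => if lp.1 = '-' then lp.2 else lp.1) := by
  induction a generalizing b with
  | nil => cases b <;> simp [pvMerge]
  | cons x as ih =>
    cases b with
    | nil => simp [pvMerge]
    | cons y bs =>
      simp only [pvTabla, List.zip_cons_cons, List.map_cons] at *
      by_cases h : x = y
      · subst h
        by_cases hx : x = '-' <;> simp [pvMerge, hx, ih]
      · simp [pvMerge, h, ih]

theorem seleccionar_partes_comunes_spec : Claim_equal_seleccionar_partes_comunes := by
  intro m1 m2 _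
  show seleccionar_partes_comunes m1 m2 = seleccionar_partes_comunes_alt m1 m2
  unfold seleccionar_partes_comunes seleccionar_partes_comunes_alt
  simp only [List.length_map]
  apply List.ext_getElem
  · simp
  · intro i h1 h2
    have hz : i < (m1.zip m2).length := by simpa using h2
    have hm1 : i < m1.length := lt_of_lt_of_le hz (by simp [List.length_zip])
    have hm2 : i < m2.length := lt_of_lt_of_le hz (by simp [List.length_zip])
    simp [List.getD_eq_getElem?_getD, hm1, hm2,
      List.getElem_zip, pvMerge_tabla]
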